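-- pv_equiv track=rewrite | github.com/freelawproject/courtlistener | cl/corpus_importer/utils.py | filter_subsets
-- ===== SOURCE A (Python) =====
-- from typing import Any, Iterator, Optional, Set
--
-- def filter_subsets(lists: list[list[int]]) -> Iterator[list[int]]:
--     """Filter subsets from matches
--
--     Given list of lists, return new list of lists without subsets
--
--     :param lists: List of matched lists ranges
--     :return: Reduced list of matches
--     """
--
--     for match in lists:
--         if not any(
--             is_subset(match, other_matches)
--             for other_matches in lists
--             if match is not other_matches
--         ):
--             yield match
--
-- def is_subset(match: list[int], other_match: list[int]) -> bool:
--     """Check if match is a subset of other matches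
--
--     Check if needle is ordered subset of haystack in O(n)
--
--     :param match: Matching range of text as the indices
--     :param other_match: Other matching range of text as indices
--     :return: Is match a subset of other match
--     """
--
--     if len(other_match) < len(match):
--         return False
--     index = 0
--     for element in match:
--         try:
--             index = other_match.index(element, index) + 1
--         except ValueError:
--             return False
--     else:
--         return True
-- ===== SOURCE B (Python) =====
-- from typing import Iterator
--
--
-- def filter_subsets(lists: list[list[int]]) -> Iterator[list[int]]:
--     """Yield the lists that are not ordered subsequences of another list.
--
--     Inverted loop nesting: for each haystack build an element -> positions
--     index once, then test every other list against it by binary search,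
--     collecting dominated indices in a set.
--     """
--     dominated = set()
--     for j, haystack in enumerate(lists):
--         pos = {}
--         for p, x in enumerate(haystack):
--             pos.setdefault(x, []).append(p)
--         for i, needle in enumerate(lists):
--             if needle is haystack or i in dominated:
--                 continue
--             cur = 0
--             for e in needle:
--                 ps = pos.get(e, [])
--                 t = _bisect_left(ps, cur)
--                 if t == len(ps):
--                     break
--                 cur = ps[t] + 1
--             else:
--                 dominated.add(i)
--     for i, match in enumerate(lists):
--         if i not in dominated:
--             yield match
--
--
-- def _bisect_left(ps: list[int], x: int) -> int:
--     """Index of the first element >= x in the sorted list ps."""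
--     lo, hi = 0, len(ps)
--     while lo < hi:
--         mid = (lo + hi) // 2
--         if ps[mid] < x:
--             lo = mid + 1
--         else:
--             hi = mid
--     return lo
-- ===== Notes on version B (the rewrite author's own statement) =====
-- stated objective: faster
-- what changed: B inverts the loop nesting: for each haystack it builds a dict from element to its sorted position list once, then tests every other list against it by binary-searching (a hand-written bisect_left) the next admissible position, collecting dominated indices in a set and yielding survivors in one final pass; A re-scans each haystack with other_match.index(element, start) for every (needle, haystack) pair.
import Mathlib
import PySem

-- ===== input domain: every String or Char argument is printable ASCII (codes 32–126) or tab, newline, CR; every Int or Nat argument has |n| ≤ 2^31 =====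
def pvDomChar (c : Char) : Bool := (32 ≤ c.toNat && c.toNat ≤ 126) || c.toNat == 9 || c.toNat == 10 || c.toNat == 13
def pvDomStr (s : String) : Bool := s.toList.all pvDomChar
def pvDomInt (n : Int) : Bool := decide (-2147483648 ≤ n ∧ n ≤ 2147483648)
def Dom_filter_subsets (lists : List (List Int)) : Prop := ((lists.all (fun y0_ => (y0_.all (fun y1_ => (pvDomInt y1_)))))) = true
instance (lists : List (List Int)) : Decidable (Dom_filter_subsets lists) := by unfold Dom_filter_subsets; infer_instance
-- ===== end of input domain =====

-- B inverts the loop nesting: for each haystack it builds an element→position-list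
-- index once and tests every other list by binary search over that index,
-- accumulating dominated indices in a set (objective: faster; measured).
-- A is a generator; its yielded values are returned here as a list, in yield order.
-- Python's `is` / `is not` identity tests are modelled by position (in)equality in
-- the list (the tester builds each inner list as a distinct object), in both ports.

-- ===== PORT A =====
-- A's is_subset loop over `match`, carrying the running start index `idx`.
-- `other_match.index(element, idx)` (no end bound) is exactly
-- `idx + first index of element in other_match[idx:]`; ValueError = none.
def isSubsetGoA (om : List Int) : List Int → Nat → Bool
  | [], _ => true
  | e :: rest, idx =>
    match PySem.List.index? (om.drop idx) e with
    | none => false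
    | some k => isSubsetGoA om rest (idx + k + 1)

def is_subset (m : List Int) (om : List Int) : Bool :=
  if om.length < m.length then false
  else isSubsetGoA om m 0

def filter_subsets (lists : List (List Int)) : List (List Int) :=
  (PySem.List.enumerate lists).filterMap (fun p =>
    if (PySem.List.enumerate lists).any (fun q => q.1 != p.1 && is_subset p.2 q.2)
    then none else some p.2)

-- ===== PORT B =====
-- B's hand-written binary search `_bisect_left` (while lo < hi): first index of
-- an element ≥ x in the sorted position list ps.
def blAux (ps : List Int) (x : Int) : Nat → Nat → Nat → Nat
  | 0, lo, _ => lo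
  | fuel + 1, lo, hi =>
    if lo < hi then
      let mid := (lo + hi) / 2
      if ps.getD mid 0 < x then blAux ps x fuel (mid + 1) hi
      else blAux ps x fuel lo mid
    else lo

def bisect_left (ps : List Int) (x : Int) : Nat := blAux ps x ps.length 0 ps.length

-- `pos.setdefault(x, []).append(p)` over enumerate(haystack)
def posMap (hay : List Int) : PySem.Dict Int (List Int) :=
  (PySem.List.enumerate hay).foldl
    (fun d p => d.modify p.2 [] (fun l => l ++ [p.1])) PySem.Dict.empty

-- B's inner `for e in needle` loop with its `break` / for-`else`
def containsB (pos : PySem.Dict Int (List Int)) : List Int → Int → Bool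
  | [], _ => true
  | e :: rest, cur =>
    let ps := pos.getD e []
    let t := bisect_left ps cur
    if h : t < ps.length then containsB pos rest (ps[t] + 1) else false

def filter_subsets_alt (lists : List (List Int)) : List (List Int) :=
  let idx := PySem.List.enumerate lists
  let dominated := idx.foldl (fun dom jh =>
    let pos := posMap jh.2
    idx.foldl (fun dom inl =>
      if inl.1 == jh.1 || PySem.Set.contains dom inl.1 then dom
      else if containsB pos inl.2 0 then PySem.Set.add dom inl.1 else dom) dom)
    PySem.Set.empty
  idx.filterMap (fun p =>
    if PySem.Set.contains dominated p.1 then none else some p.2)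

-- ===== PRECONDITION & SPEC =====
def Spec_filter_subsets (lists : List (List Int)) (out : List (List Int)) : Prop := out = filter_subsets_alt lists
instance (lists : List (List Int)) (out : List (List Int)) : Decidable (Spec_filter_subsets lists out) := by unfold Spec_filter_subsets; infer_instance

-- ===== CLAIM (what is proved, stated in full; the proofs are below) =====
def Claim_equal_filter_subsets : Prop := ∀ (lists : List (List Int)), Dom_filter_subsets lists → Spec_filter_subsets lists (filter_subsets lists)

-- ===== LEMMAS AND PROOFS =====

-- Both subsequence tests decide `List.Sublist m hs`.  First the A side.

theorem cons_sublist_cons_iff' (a : Int) (m hs : List Int) :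
    List.Sublist (a :: m) (a :: hs) ↔ List.Sublist m hs := by
  constructor
  · intro h
    cases h with
    | cons _ h' => exact (List.sublist_cons_self a m).trans h'
    | cons₂ _ h' => exact h'
  · intro h; exact h.cons₂ a

-- Peeling lemma: if e does not occur in pre, a subsequence
-- embedding of e :: rest into pre ++ e :: suf must match the shown e.
theorem sublist_peel (e : Int) (rest : List Int) :
    ∀ pre suf : List Int, e ∉ pre →
      List.Sublist (e :: rest) (pre ++ e :: suf) → List.Sublist rest suf := by
  intro pre
  induction pre with
  | nil =>
    intro suf _ h
    exact (cons_sublist_cons_iff' e rest suf).mp h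
  | cons p pre ih =>
    intro suf hnotin h
    cases h with
    | cons _ h' => exact ih suf (fun hm => hnotin (List.mem_cons_of_mem p hm)) h'
    | cons₂ _ h' => exact absurd List.mem_cons_self hnotin

-- First-occurrence lemma: if k is the first index of e in s, then
-- e :: rest embeds into s iff rest embeds into s.drop (k + 1).
theorem cons_sublist_iff_first (e : Int) (rest s : List Int) (k : Nat)
    (hk : PySem.List.index? s e = some k) :
    List.Sublist (e :: rest) s ↔ List.Sublist rest (s.drop (k + 1)) := by
  rw [PySem.List.index?_eq_some_iff] at hk
  obtain ⟨pre, suf, hs, hlen, hnotin⟩ := hk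
  subst hs; subst hlen
  have hdrop : (pre ++ e :: suf).drop (pre.length + 1) = suf := by
    simp [List.drop_append]
  rw [hdrop]
  constructor
  · exact sublist_peel e rest pre suf hnotin
  · intro h
    exact (h.cons₂ e).trans (List.sublist_append_right pre (e :: suf))

theorem isSubsetGoA_eq (om : List Int) (m : List Int) :
    ∀ idx, isSubsetGoA om m idx = decide (List.Sublist m (om.drop idx)) := by
  induction m with
  | nil => intro idx; simp [isSubsetGoA]
  | cons e rest ih =>
    intro idx
    unfold isSubsetGoA
    cases hidx : PySem.List.index? (om.drop idx) e with
    | none =>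
      rw [PySem.List.index?_eq_none_iff] at hidx
      have : ¬ List.Sublist (e :: rest) (om.drop idx) := fun h => hidx (h.mem List.mem_cons_self)
      simp [this]
    | some k =>
      show isSubsetGoA om rest (idx + k + 1) = decide (List.Sublist (e :: rest) (om.drop idx))
      have hd : (om.drop idx).drop (k + 1) = om.drop (idx + k + 1) := by
        rw [List.drop_drop]
        congr 1
      rw [ih (idx + k + 1), decide_eq_decide,
        cons_sublist_iff_first e rest (om.drop idx) k hidx, hd]

theorem is_subset_eq_sublist (m om : List Int) :
    is_subset m om = decide (List.Sublist m om) := by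
  unfold is_subset
  split_ifs with hlen
  · have : ¬ List.Sublist m om := fun h => by
      have := h.length_le; omega
    simp [this]
  · rw [isSubsetGoA_eq om m 0, List.drop_zero]

-- Now the B side.  Binary search: on a sorted list, blAux returns the number
-- of elements < x (the first index holding an element ≥ x).

theorem countP_lt_of_sorted : ∀ (ps : List Int) (x : Int), ps.Pairwise (· ≤ ·) →
    ∀ j (hj : j < ps.length),
      (ps[j] < x ↔ j < ps.countP (fun a => decide (a < x))) := by
  intro ps x
  induction ps with
  | nil => intro _ j hj; simp at hj
  | cons a t ih =>
    intro h j hj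
    rw [List.pairwise_cons] at h
    rw [List.countP_cons]
    rcases j with _ | j
    · by_cases hax : a < x
      · simp [hax]
      · have hz : t.countP (fun a => decide (a < x)) = 0 := by
          rw [List.countP_eq_zero]
          intro b hb
          have := h.1 b hb
          simp only [decide_eq_true_eq]
          omega
        simp [hax, hz]
    · simp only [List.getElem_cons_succ]
      have hj' : j < t.length := by simpa using hj
      rw [ih h.2 j hj']
      by_cases hax : a < x
      · simp [hax]
      · have hz : t.countP (fun a => decide (a < x)) = 0 := by
          rw [List.countP_eq_zero]
          intro b hb
          have := h.1 b hb
          simp only [decide_eq_true_eq]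
          omega
        simp [hax, hz]

theorem blAux_eq_countP (ps : List Int) (x : Int) (h : ps.Pairwise (· ≤ ·)) :
    ∀ n lo hi, hi - lo ≤ n → hi ≤ ps.length →
      lo ≤ ps.countP (fun a => decide (a < x)) →
      ps.countP (fun a => decide (a < x)) ≤ hi →
      blAux ps x n lo hi = ps.countP (fun a => decide (a < x)) := by
  intro n
  induction n with
  | zero =>
    intro lo hi hn hhi h1 h2
    simp only [blAux]
    omega
  | succ n ih =>
    intro lo hi hn hhi h1 h2
    simp only [blAux]
    by_cases hlt : lo < hi
    · simp only [if_pos hlt]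
      have hmidlen : (lo + hi) / 2 < ps.length := by omega
      rw [List.getD_eq_getElem ps 0 hmidlen]
      have hiff := countP_lt_of_sorted ps x h ((lo + hi) / 2) hmidlen
      by_cases hc : ps[(lo + hi) / 2] < x
      · rw [if_pos hc]
        have hcc := hiff.mp hc
        exact ih ((lo + hi) / 2 + 1) hi (by omega) hhi (by omega) h2
      · rw [if_neg hc]
        have hcc : ¬ ((lo + hi) / 2 < ps.countP (fun a => decide (a < x))) :=
          fun hh => hc (hiff.mpr hh)
        exact ih lo ((lo + hi) / 2) (by omega) (by omega) h1 (by omega)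
    · simp only [if_neg hlt]
      omega

theorem bisect_left_eq_countP (ps : List Int) (x : Int) (h : ps.Pairwise (· ≤ ·)) :
    bisect_left ps x = ps.countP (fun a => decide (a < x)) :=
  blAux_eq_countP ps x h ps.length 0 ps.length (by omega) le_rfl (Nat.zero_le _)
    List.countP_le_length

-- The position list stored for e by posMap: all indices of e in hay, in order.
def posList (hay : List Int) (e : Int) : List Int :=
  ((PySem.List.enumerate hay).filter (fun p => p.2 == e)).map (fun p => p.1)

theorem posMap_getD (hay : List Int) (e : Int) :
    (posMap hay).getD e [] = posList hay e := by
  have key := PySem.Dict.getD_foldl_modify_append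
    ((PySem.List.enumerate hay).map (fun p => (p.2, p.1))) PySem.Dict.empty e
  rw [List.foldl_map] at key
  unfold posMap posList
  rw [key]
  simp [List.filter_map, List.map_map, Function.comp_def]

theorem posList_pairwise (hay : List Int) (e : Int) :
    (posList hay e).Pairwise (· < ·) := by
  unfold posList
  rw [List.pairwise_map]
  exact List.Pairwise.filter _ (PySem.List.pairwise_lt_enumerate hay 0)

theorem mem_posList (hay : List Int) (e : Int) (q : Int) :
    q ∈ posList hay e ↔ ∃ k : Nat, q = (k : Int) ∧ hay[k]? = some e := by
  unfold posList
  simp only [List.mem_map, List.mem_filter, PySem.List.mem_enumerate_iff]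
  constructor
  · rintro ⟨p, ⟨⟨k, hk, rfl⟩, hpe⟩, rfl⟩
    refine ⟨k, by simp, ?_⟩
    rw [List.getElem?_eq_getElem hk]
    simpa using hpe
  · rintro ⟨k, rfl, he⟩
    have hk : k < hay.length := by
      by_contra hk
      rw [List.getElem?_eq_none (by omega)] at he
      simp at he
    rw [List.getElem?_eq_getElem hk] at he
    exact ⟨((k : Int), hay[k]), ⟨⟨k, hk, by simp⟩, by simpa using Option.some.inj he⟩, rfl⟩

-- index? from a first-occurrence description.
theorem index?_eq_some_of_first (v : Int) :
    ∀ (xs : List Int) (k : Nat), xs[k]? = some v → (∀ j, j < k → xs[j]? ≠ some v) →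
      PySem.List.index? xs v = some k := by
  intro xs
  induction xs with
  | nil => intro k hk; simp at hk
  | cons a t ih =>
    intro k hv hmin
    rcases k with _ | k
    · have ha : a = v := by simpa using hv
      subst ha
      rw [PySem.List.index?_cons_self]
    · have ha : a ≠ v := by
        intro hav
        exact hmin 0 (Nat.succ_pos k) (by simp [hav])
      rw [PySem.List.index?_cons_of_ne t (by exact ha)]
      rw [ih k (by simpa using hv) (fun j hj hje => hmin (j + 1) (by omega) (by simpa using hje))]
      rfl

-- Bridge: the binary-search step over posList computes A's index?-on-drop step.
theorem step_bridge (hay : List Int) (e : Int) (cur : Nat) :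
    (if h : bisect_left (posList hay e) (cur : Int) < (posList hay e).length
      then some ((posList hay e)[bisect_left (posList hay e) (cur : Int)]'h) else none)
      = (PySem.List.index? (hay.drop cur) e).map (fun k => ((cur + k : Nat) : Int)) := by
  have hs := posList_pairwise hay e
  have hle : (posList hay e).Pairwise (· ≤ ·) := hs.imp le_of_lt
  have hiff := countP_lt_of_sorted (posList hay e) (cur : Int) hle
  simp only [bisect_left_eq_countP _ _ hle]
  set ps := posList hay e with hps
  set t := ps.countP (fun a => decide (a < (cur : Int))) with htdef
  by_cases ht : t < ps.length
  · -- some case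
    have hnotlt : ¬ ps[t] < (cur : Int) := fun hh => by
      have := (hiff t ht).mp hh; omega
    have hmem : ps[t] ∈ ps := List.getElem_mem ht
    obtain ⟨k0, hpk0, hvk0⟩ := (mem_posList hay e ps[t]).mp hmem
    have hcurk0 : cur ≤ k0 := by
      rw [hpk0] at hnotlt
      exact_mod_cast not_lt.mp hnotlt
    have hk0len : k0 < hay.length := by
      by_contra hk
      rw [List.getElem?_eq_none (by omega)] at hvk0
      simp at hvk0
    have hidx : PySem.List.index? (hay.drop cur) e = some (k0 - cur) := by
      apply index?_eq_some_of_first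
      · rw [List.getElem?_drop]
        rw [show cur + (k0 - cur) = k0 from by omega]
        exact hvk0
      · intro j hj hje
        rw [List.getElem?_drop] at hje
        have hmem2 : ((cur + j : Nat) : Int) ∈ ps := (mem_posList hay e _).mpr ⟨cur + j, rfl, hje⟩
        obtain ⟨i0, hi0, hpi0⟩ := List.mem_iff_getElem.mp hmem2
        have hge : ¬ ps[i0] < (cur : Int) := by
          rw [hpi0]; push_cast; omega
        have hti0 : t ≤ i0 := by
          by_contra hti0
          exact hge ((hiff i0 hi0).mpr (by omega))
        have hlt2 : ps[t] ≤ ps[i0] := by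
          rcases Nat.eq_or_lt_of_le hti0 with heq | hlt3
          · exact le_of_eq (by congr 1)
          · exact le_of_lt (List.pairwise_iff_getElem.mp hs t i0 ht hi0 hlt3)
        rw [hpi0, hpk0] at hlt2
        have : k0 ≤ cur + j := by exact_mod_cast hlt2
        omega
    rw [dif_pos ht, hidx]
    simp only [Option.map_some, Option.some.injEq]
    rw [hpk0]
    congr 1
    omega
  · -- none case
    have hnone : PySem.List.index? (hay.drop cur) e = none := by
      rw [PySem.List.index?_eq_none_iff]
      intro hmem
      obtain ⟨j, hj, hje⟩ := List.mem_iff_getElem.mp hmem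
      have hje' : hay[cur + j]? = some e := by
        rw [← List.getElem?_drop, List.getElem?_eq_getElem hj, hje]
      have hmem2 : ((cur + j : Nat) : Int) ∈ ps := (mem_posList hay e _).mpr ⟨cur + j, rfl, hje'⟩
      obtain ⟨i0, hi0, hpi0⟩ := List.mem_iff_getElem.mp hmem2
      have hlt := (hiff i0 hi0).mpr (by omega)
      rw [hpi0] at hlt
      push_cast at hlt
      omega
    rw [dif_neg ht, hnone]
    rfl

theorem containsB_eq (hay m : List Int) :
    ∀ cur : Nat, containsB (posMap hay) m ((cur : Nat) : Int) = isSubsetGoA hay m cur := by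
  induction m with
  | nil => intro cur; rfl
  | cons e rest ih =>
    intro cur
    have hb := step_bridge hay e cur
    show (let ps := (posMap hay).getD e [];
          let t := bisect_left ps ((cur : Nat) : Int);
          if h : t < ps.length then containsB (posMap hay) rest (ps[t] + 1) else false)
        = isSubsetGoA hay (e :: rest) cur
    simp only [posMap_getD]
    unfold isSubsetGoA
    cases hidx : PySem.List.index? (hay.drop cur) e with
    | none =>
      rw [hidx] at hb
      simp only [Option.map_none] at hb
      by_cases ht : bisect_left (posList hay e) ((cur : Nat) : Int) < (posList hay e).length
      · rw [dif_pos ht] at hb; simp at hb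
      · exact dif_neg ht
    | some k =>
      rw [hidx] at hb
      simp only [Option.map_some] at hb
      by_cases ht : bisect_left (posList hay e) ((cur : Nat) : Int) < (posList hay e).length
      · rw [dif_pos ht] at hb
        rw [dif_pos ht, Option.some.inj hb]
        rw [show ((cur + k : Nat) : Int) + 1 = ((cur + k + 1 : Nat) : Int) from by push_cast; ring]
        exact ih (cur + k + 1)
      · rw [dif_neg ht] at hb; simp at hb

theorem containsB_eq_is_subset (m hay : List Int) :
    containsB (posMap hay) m 0 = is_subset m hay := by
  rw [is_subset_eq_sublist]
  have h0 : (0 : Int) = ((0 : Nat) : Int) := rfl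
  rw [h0, containsB_eq hay m 0, isSubsetGoA_eq hay m 0, List.drop_zero]

-- Outer loops: the dominated set collects exactly the indices whose list is a
-- subsequence of some other list.

theorem set_contains_add (s : PySem.Set Int) (x y : Int) :
    PySem.Set.contains (PySem.Set.add s x) y = (PySem.Set.contains s y || y == x) := by
  by_cases hxy : y = x
  · subst hxy
    simp [PySem.Set.mem_add]
  · simp [PySem.Set.mem_add, hxy]

theorem inner_contains (pos : PySem.Dict Int (List Int)) (j : Int)
    (l : List (Int × List Int)) (i : Int) :
    ∀ dom : PySem.Set Int,
    PySem.Set.contains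
      (l.foldl (fun dom inl =>
        if inl.1 == j || PySem.Set.contains dom inl.1 then dom
        else if containsB pos inl.2 0 then PySem.Set.add dom inl.1 else dom) dom) i
    = (PySem.Set.contains dom i ||
        l.any (fun p => p.1 == i && !(p.1 == j) && containsB pos p.2 0)) := by
  induction l with
  | nil => intro dom; simp
  | cons p l ih =>
    intro dom
    simp only [List.foldl_cons, List.any_cons]
    by_cases hpj : p.1 = j
    · rw [if_pos (by simp [hpj]), ih dom]
      simp [hpj]
    · have hfj : (p.1 == j) = false := beq_eq_false_iff_ne.mpr hpj
      by_cases hdom : p.1 ∈ dom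
      · rw [if_pos (by simp [PySem.Set.contains, hdom]), ih dom]
        by_cases hpi : p.1 = i
        · subst hpi
          simp [PySem.Set.contains, hdom]
        · have hfi : (p.1 == i) = false := beq_eq_false_iff_ne.mpr hpi
          simp [hfi]
      · rw [if_neg (by simp [PySem.Set.contains, hpj, hdom])]
        by_cases hc : containsB pos p.2 0 = true
        · rw [if_pos hc, ih (PySem.Set.add dom p.1), set_contains_add]
          by_cases hpi : p.1 = i
          · subst hpi
            simp [hc, hfj]
          · have hfi : (p.1 == i) = false := beq_eq_false_iff_ne.mpr hpi
            have hfi' : (i == p.1) = false := beq_eq_false_iff_ne.mpr (Ne.symm hpi)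
            simp [hfi, hfi']
        · have hcf : containsB pos p.2 0 = false := by simpa using hc
          rw [if_neg hc, ih dom]
          simp [hcf]

theorem outer_contains (idx : List (Int × List Int))
    (L : List (Int × List Int)) (i : Int) :
    ∀ dom : PySem.Set Int,
    PySem.Set.contains
      (L.foldl (fun dom jh =>
        idx.foldl (fun dom inl =>
          if inl.1 == jh.1 || PySem.Set.contains dom inl.1 then dom
          else if containsB (posMap jh.2) inl.2 0 then PySem.Set.add dom inl.1 else dom) dom) dom) i
    = (PySem.Set.contains dom i ||
        L.any (fun q => idx.any (fun p => p.1 == i && !(p.1 == q.1) && containsB (posMap q.2) p.2 0))) := by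
  induction L with
  | nil => intro dom; simp
  | cons q L ih =>
    intro dom
    simp only [List.foldl_cons, List.any_cons]
    rw [ih, inner_contains]
    rw [Bool.or_assoc]

-- Any over the enumerate keyed by a fixed first component picks that entry.
theorem enum_any_key (lists : List (List Int)) (p : Int × List Int)
    (hp : p ∈ PySem.List.enumerate lists) (X : Int × List Int → Bool) :
    (PySem.List.enumerate lists).any (fun r => r.1 == p.1 && X r) = X p := by
  by_cases hX : X p = true
  · rw [List.any_eq_true.mpr ⟨p, hp, by simp [hX]⟩, hX]
  · have hXf : X p = false := by simpa using hX
    rw [hXf, List.any_eq_false]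
    intro r hr h
    rw [Bool.and_eq_true, beq_iff_eq] at h
    obtain ⟨k, hk, rfl⟩ := (PySem.List.mem_enumerate_iff lists 0 p).mp hp
    obtain ⟨k', hk', rfl⟩ := (PySem.List.mem_enumerate_iff lists 0 r).mp hr
    have hkk : k' = k := by
      have h1 := h.1
      simp only at h1
      omega
    subst hkk
    rw [h.2] at hXf
    exact Bool.noConfusion hXf

-- ===== VERDICT (by name: the statement is the Claim_ definition above) =====
theorem filter_subsets_spec : Claim_equal_filter_subsets := by
  intro lists _
  unfold Spec_filter_subsets filter_subsets filter_subsets_alt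
  simp only []
  apply List.filterMap_congr
  intro p hp
  rw [outer_contains]
  have hempty : PySem.Set.contains (PySem.Set.empty) p.1 = false := rfl
  rw [hempty, Bool.false_or]
  have hanyeq : (PySem.List.enumerate lists).any
      (fun q => (PySem.List.enumerate lists).any
        (fun r => r.1 == p.1 && !(r.1 == q.1) && containsB (posMap q.2) r.2 0))
      = (PySem.List.enumerate lists).any (fun q => q.1 != p.1 && is_subset p.2 q.2) := by
    apply PySem.List.any_congr_mem
    intro q hq
    rw [show (fun r : Int × List Int => r.1 == p.1 && !(r.1 == q.1) && containsB (posMap q.2) r.2 0)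
        = (fun r : Int × List Int => r.1 == p.1 && (!(r.1 == q.1) && containsB (posMap q.2) r.2 0)) from by
      funext r; rw [Bool.and_assoc]]
    rw [enum_any_key lists p hp (fun r => !(r.1 == q.1) && containsB (posMap q.2) r.2 0)]
    rw [containsB_eq_is_subset]
    have : (q.1 != p.1) = !(p.1 == q.1) := by
      simp [bne, eq_comm]
    rw [this]
  rw [hanyeq]
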